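-- pv_equiv track=rewrite | github.com/delilit/Math_Calculated_graphic_work | main.py | get_positions_straight
-- ===== SOURCE A (Python) =====
-- def get_positions_straight(lenghts):
--     lenghs_checkout = []
--     pos = {}
--     for lenght in lenghts:
--         if lenght not in lenghs_checkout:
--             lenghs_checkout.append(lenght)
--     lenghs_checkout.sort()
--     for i in range(len(lenghs_checkout)):
--         pos[str(lenghs_checkout[i])] = (i, 0)
--     return pos
-- ===== SOURCE B (Python) =====
-- def get_positions_straight(lenghts):
--     pos = {}
--     rank = 0
--     prev = None
--     for value in sorted(lenghts):
--         if prev is None or value != prev: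
--             pos[str(value)] = (rank, 0)
--             rank += 1
--             prev = value
--     return pos
-- ===== Notes on version B (the rewrite author's own statement) =====
-- stated objective: simpler
-- what changed: Replaces the quadratic membership-list dedup plus separate sort and index loop by one sorted() pass that dedups by adjacency with a rank counter and prev sentinel.
import Mathlib
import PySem

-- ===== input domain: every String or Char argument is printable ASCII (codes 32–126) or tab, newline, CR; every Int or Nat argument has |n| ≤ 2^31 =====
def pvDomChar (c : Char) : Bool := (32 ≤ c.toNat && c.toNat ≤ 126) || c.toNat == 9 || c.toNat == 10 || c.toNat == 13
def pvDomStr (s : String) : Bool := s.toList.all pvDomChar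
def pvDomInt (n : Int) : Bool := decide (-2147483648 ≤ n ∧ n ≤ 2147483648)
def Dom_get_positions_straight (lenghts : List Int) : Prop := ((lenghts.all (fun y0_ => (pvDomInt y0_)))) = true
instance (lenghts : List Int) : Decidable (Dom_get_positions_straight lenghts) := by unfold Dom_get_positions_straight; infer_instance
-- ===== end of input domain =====

-- B replaces A's quadratic membership-list dedup + separate sort + index loop by one
-- sorted() pass that dedups by adjacency with a rank counter and prev sentinel.

-- ===== PORT A =====
def get_positions_straight (lenghts : List Int) : List (String × Int × Int) :=
  let lenghs_checkout : List Int :=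
    lenghts.foldl (fun acc lenght => if acc.contains lenght then acc else acc ++ [lenght]) []
  let sortedCheckout := PySem.List.sorted lenghs_checkout (fun x => x)
  let pos : PySem.Dict String (Int × Int) :=
    (PySem.List.pyRange 0 (PySem.List.len sortedCheckout) 1).foldl
      (fun d i => d.insert (PySem.Int.toStr (PySem.List.pyGetD sortedCheckout i 0)) (i, 0))
      PySem.Dict.empty
  pos.items

-- ===== PORT B =====
def get_positions_straight_alt (lenghts : List Int) : List (String × Int × Int) :=
  let st :=
    (PySem.List.sorted lenghts (fun x => x)).foldl
      (fun (st : PySem.Dict String (Int × Int) × Int × Option Int) value =>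
        if st.2.2 = none ∨ some value ≠ st.2.2 then
          (st.1.insert (PySem.Int.toStr value) (st.2.1, 0), st.2.1 + 1, some value)
        else st)
      (PySem.Dict.empty, 0, none)
  st.1.items

-- ===== PRECONDITION & SPEC =====
def Spec_get_positions_straight (lenghts : List Int) (out : List (String × Int × Int)) : Prop := out = get_positions_straight_alt lenghts
instance (lenghts : List Int) (out : List (String × Int × Int)) : Decidable (Spec_get_positions_straight lenghts out) := by unfold Spec_get_positions_straight; infer_instance

-- ===== CLAIM (what is proved, stated in full; the proofs are below) =====
def Claim_equal_get_positions_straight : Prop := ∀ (lenghts : List Int), Dom_get_positions_straight lenghts → Spec_get_positions_straight lenghts (get_positions_straight lenghts)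

-- ===== LEMMAS AND PROOFS =====

/-- Insert `(str v, (r,0))` for the elements of a list with consecutive ranks starting at `r`. -/
def pvInsEnum : List Int → PySem.Dict String (Int × Int) → Int → PySem.Dict String (Int × Int)
  | [], d, _ => d
  | v :: t, d, r => pvInsEnum t (d.insert (PySem.Int.toStr v) (r, 0)) (r + 1)

/-- Adjacent dedup relative to the last kept element `p`. -/
def pvAdj : Option Int → List Int → List Int
  | _, [] => []
  | p, v :: t => if some v ≠ p then v :: pvAdj (some v) t else pvAdj p t

theorem pv_foldl_enumerate (S : List Int) :
    ∀ (d : PySem.Dict String (Int × Int)) (s : Int),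
      (PySem.List.enumerate S s).foldl
        (fun d (p : Int × Int) => d.insert (PySem.Int.toStr p.2) (p.1, 0)) d
      = pvInsEnum S d s := by
  induction S with
  | nil => intro d s; simp [PySem.List.enumerate, pvInsEnum]
  | cons v t ih =>
      intro d s
      rw [PySem.List.enumerate_cons]
      simp only [List.foldl_cons]
      exact ih _ _

theorem pv_range_fold (S : List Int) (d : PySem.Dict String (Int × Int)) :
    (PySem.List.pyRange 0 (PySem.List.len S) 1).foldl
        (fun d i => d.insert (PySem.Int.toStr (PySem.List.pyGetD S i 0)) (i, 0)) d
      = pvInsEnum S d 0 := by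
  have hmap := PySem.List.enumerate_eq_map_pyRange S 0
  have : (PySem.List.pyRange 0 (PySem.List.len S) 1).foldl
        (fun d i => d.insert (PySem.Int.toStr (PySem.List.pyGetD S i 0)) (i, 0)) d
      = ((PySem.List.pyRange 0 (PySem.List.len S) 1).map
          (fun j => (j, PySem.List.pyGetD S j 0))).foldl
        (fun d (p : Int × Int) => d.insert (PySem.Int.toStr p.2) (p.1, 0)) d := by
    rw [List.foldl_map]
  rw [this, ← hmap, pv_foldl_enumerate]

theorem pv_scan_fold (ys : List Int) :
    ∀ (d : PySem.Dict String (Int × Int)) (r : Int) (p : Option Int),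
      (ys.foldl
        (fun (st : PySem.Dict String (Int × Int) × Int × Option Int) value =>
          if st.2.2 = none ∨ some value ≠ st.2.2 then
            (st.1.insert (PySem.Int.toStr value) (st.2.1, 0), st.2.1 + 1, some value)
          else st)
        (d, r, p)).1
      = pvInsEnum (pvAdj p ys) d r := by
  induction ys with
  | nil => intro d r p; simp [pvAdj, pvInsEnum]
  | cons v t ih =>
      intro d r p
      by_cases h : some v = p
      · subst h
        simp only [List.foldl_cons]
        simpa [pvAdj] using ih d r (some v)
      · simp only [List.foldl_cons]
        simpa [pvAdj, h, pvInsEnum] using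
          ih (d.insert (PySem.Int.toStr v) (r, 0)) (r + 1) (some v)

theorem pv_adj_mem (ys : List Int) :
    ∀ (p : Option Int), ys.Pairwise (· ≤ ·) →
      (∀ q, p = some q → ∀ y ∈ ys, q ≤ y) →
      ∀ y : Int, y ∈ pvAdj p ys ↔ (y ∈ ys ∧ some y ≠ p) := by
  induction ys with
  | nil => intro p _ _ y; simp [pvAdj]
  | cons v t ih =>
      intro p hs hp y
      have hvt : ∀ z ∈ t, v ≤ z := (List.pairwise_cons.mp hs).1
      have hst : t.Pairwise (· ≤ ·) := (List.pairwise_cons.mp hs).2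
      by_cases h : some v = p
      · subst h
        rw [show pvAdj (some v) (v :: t) = pvAdj (some v) t from by simp [pvAdj]]
        rw [ih (some v) hst (fun q hq z hz => hp q hq z (List.mem_cons_of_mem _ hz)) y]
        constructor
        · rintro ⟨hy, hne⟩; exact ⟨List.mem_cons_of_mem _ hy, hne⟩
        · rintro ⟨hy, hne⟩
          rcases List.mem_cons.mp hy with rfl | hy
          · exact absurd rfl hne
          · exact ⟨hy, hne⟩
      · rw [show pvAdj p (v :: t) = v :: pvAdj (some v) t from by simp [pvAdj, h]]
        rw [List.mem_cons, ih (some v) hst (fun q hq z hz => by cases hq; exact hvt z hz) y]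
        constructor
        · rintro (rfl | ⟨hy, hne⟩)
          · exact ⟨List.mem_cons_self .., fun hc => h hc⟩
          · refine ⟨List.mem_cons_of_mem _ hy, ?_⟩
            intro hc
            rcases p with _ | q
            · simp at hc
            · have hq : q ≤ v := hp q rfl v (List.mem_cons_self ..)
              have hyq : y = q := by simpa using hc
              have hvy : v ≤ y := hvt y hy
              apply hne
              have : y = v := le_antisymm (hyq ▸ hq) hvy
              simp [this]
        · rintro ⟨hy, hne⟩
          rcases List.mem_cons.mp hy with rfl | hy
          · exact Or.inl rfl
          · by_cases hyv : y = v
            · exact Or.inl hyv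
            · exact Or.inr ⟨hy, by simp [hyv]⟩

theorem pv_adj_sorted (ys : List Int) :
    ∀ (p : Option Int), ys.Pairwise (· ≤ ·) →
      (∀ q, p = some q → ∀ y ∈ ys, q ≤ y) →
      (pvAdj p ys).Pairwise (· < ·) := by
  induction ys with
  | nil => intro p _ _; simp [pvAdj]
  | cons v t ih =>
      intro p hs hp
      have hvt : ∀ z ∈ t, v ≤ z := (List.pairwise_cons.mp hs).1
      have hst : t.Pairwise (· ≤ ·) := (List.pairwise_cons.mp hs).2
      by_cases h : some v = p
      · subst h
        rw [show pvAdj (some v) (v :: t) = pvAdj (some v) t from by simp [pvAdj]]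
        exact ih (some v) hst (fun q hq z hz => hp q hq z (List.mem_cons_of_mem _ hz))
      · rw [show pvAdj p (v :: t) = v :: pvAdj (some v) t from by simp [pvAdj, h]]
        refine List.pairwise_cons.mpr ⟨?_, ih (some v) hst (fun q hq z hz => by cases hq; exact hvt z hz)⟩
        intro y hy
        rw [pv_adj_mem t (some v) hst (fun q hq z hz => by cases hq; exact hvt z hz) y] at hy
        rcases hy with ⟨hy, hne⟩
        exact lt_of_le_of_ne (hvt y hy) (fun hc => hne (by simp [hc.symm]))

theorem pv_adj_eq (xs : List Int) :
    pvAdj none (PySem.List.sorted xs (fun x => x))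
      = PySem.List.sorted (PySem.List.dedup xs) (fun x => x) := by
  have hs : (PySem.List.sorted xs (fun x => x)).Pairwise (· ≤ ·) :=
    PySem.List.sorted_pairwise xs (fun x => x)
  have hnone : ∀ q, (none : Option Int) = some q →
      ∀ y ∈ PySem.List.sorted xs (fun x => x), q ≤ y := by intro q hq; cases hq
  have hlt : (pvAdj none (PySem.List.sorted xs (fun x => x))).Pairwise (· < ·) :=
    pv_adj_sorted _ none hs hnone
  have hnd : (pvAdj none (PySem.List.sorted xs (fun x => x))).Nodup :=
    hlt.imp (fun h => ne_of_lt h)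
  have hperm : (pvAdj none (PySem.List.sorted xs (fun x => x))).Perm (PySem.List.dedup xs) := by
    rw [List.perm_ext_iff_of_nodup hnd (PySem.List.nodup_dedup xs)]
    intro y
    rw [pv_adj_mem _ none hs hnone y, PySem.List.mem_dedup, PySem.List.mem_sorted]
    simp
  exact (PySem.List.sorted_eq_of_perm_of_pairwise_lt _ _ _ hperm hlt).symm

theorem pv_dedup_fold (xs : List Int) :
    xs.foldl (fun acc lenght => if acc.contains lenght then acc else acc ++ [lenght]) []
      = PySem.List.dedup xs := rfl

-- ===== VERDICT (by name: the statement is the Claim_ definition above) =====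
theorem get_positions_straight_spec : Claim_equal_get_positions_straight := by
  intro xs _
  show get_positions_straight xs = get_positions_straight_alt xs
  unfold get_positions_straight get_positions_straight_alt
  simp only [pv_dedup_fold, pv_range_fold, pv_scan_fold, pv_adj_eq]
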